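-- pv_equiv track=rewrite | github.com/alityb/parallel-agents | batch_agent/compiler.py | _text_before_first_field
-- ===== SOURCE A (Python) =====
-- import string
--
-- def _text_before_first_field(template: str) -> str:
--     parsed = string.Formatter().parse(template)
--     text = []
--     for literal_text, field_name, _, _ in parsed:
--         text.append(literal_text)
--         if field_name is not None:
--             break
--     return "".join(text)
-- ===== SOURCE B (Python) =====
-- def _text_before_first_field(template: str) -> str:
--     out = []
--     i = 0
--     n = len(template)
--     while i < n:
--         c = template[i]
--         if c == '{':
--             if i + 1 < n and template[i + 1] == '{':
--                 out.append('{')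
--                 i += 2
--                 continue
--             if i + 1 >= n:
--                 raise ValueError("Single '{' encountered in format string")
--             return ''.join(out)  # a replacement field begins here
--         if c == '}':
--             if i + 1 < n and template[i + 1] == '}':
--                 out.append('}')
--                 i += 2
--                 continue
--             raise ValueError("Single '}' encountered in format string")
--         out.append(c)
--         i += 1
--     return ''.join(out)
-- ===== Notes on version B (the rewrite author's own statement) =====
-- stated objective: simpler
-- what changed: Drops string.Formatter().parse (which tokenises the whole first field, name/conversion/format-spec included) in favour of a single direct index scan that collects literal characters, unescapes doubled braces, and returns as soon as a replacement field starts, without parsing the field at all.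
import Mathlib
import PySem

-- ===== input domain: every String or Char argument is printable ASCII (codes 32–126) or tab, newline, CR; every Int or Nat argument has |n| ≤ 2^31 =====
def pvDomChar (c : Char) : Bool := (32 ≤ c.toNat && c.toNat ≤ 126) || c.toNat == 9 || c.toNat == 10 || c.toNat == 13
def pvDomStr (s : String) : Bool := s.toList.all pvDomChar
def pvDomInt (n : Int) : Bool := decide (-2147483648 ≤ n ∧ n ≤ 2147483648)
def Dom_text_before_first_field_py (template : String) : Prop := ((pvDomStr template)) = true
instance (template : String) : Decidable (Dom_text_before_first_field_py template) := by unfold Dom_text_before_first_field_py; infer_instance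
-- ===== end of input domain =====

-- B replaces string.Formatter().parse with one direct index scan that stops at the first
-- replacement field without parsing it (objective: simpler; same O(n) cost).


-- ===== PORT A =====
-- PySem has no primitive for string.Formatter().parse, so its next-step (CPython's
-- MarkupIterator_next in Objects/stringlib/unicode_format.h) is ported by hand, step for
-- step; exact wherever parse does not raise (raising inputs are excluded by Pre_ below,
-- and there the port returns an arbitrary value instead of an exception).

-- continuation after one literal chunk: end of template / doubled brace ended the chunk
-- (iteration continues at the given rest) / '{' opened a replacement field (rest follows)
inductive PvChunk where
  | atEnd : PvChunk
  | lit : List Char → PvChunk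
  | field : List Char → PvChunk
deriving Repr, DecidableEq

-- literal scan of one parse step; none = ValueError (lone '}')
def pvLit : List Char → List Char → Option (List Char × PvChunk)
  | acc, [] => some (acc.reverse, .atEnd)
  | acc, '{' :: '{' :: r => some (('{' :: acc).reverse, .lit r)
  | acc, '}' :: '}' :: r => some (('}' :: acc).reverse, .lit r)
  | acc, '{' :: r => some (acc.reverse, .field r)
  | _acc, '}' :: _ => none
  | acc, c :: r => pvLit (c :: acc) r

-- format-spec scan (brace-depth counting); none = ValueError
def pvSpec : List Char → Nat → Option (List Char)
  | [], _ => none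
  | '{' :: r, d => pvSpec r (d + 1)
  | '}' :: r, d => if d = 0 then some r else pvSpec r (d - 1)
  | _ :: r, d => pvSpec r d

-- field-name scan (Bool flag = inside '[...]'); returns the field name; none = ValueError
def pvName : List Char → Bool → List Char → Option (List Char)
  | _, _, [] => none
  | acc, true, c :: r => if c = ']' then pvName (c :: acc) false r else pvName (c :: acc) true r
  | _, false, '{' :: _ => none
  | acc, false, '}' :: _ => some acc.reverse
  | acc, false, '[' :: r => pvName ('[' :: acc) true r
  | acc, false, '!' :: r =>
      match r with
      | _ :: '}' :: _ => some acc.reverse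
      | _ :: ':' :: r3 => match pvSpec r3 0 with
                          | some _ => some acc.reverse
                          | none => none
      | _ => none
  | acc, false, ':' :: r => match pvSpec r 0 with
                            | some _ => some acc.reverse
                            | none => none
  | acc, false, c :: r => pvName (c :: acc) false r

-- one step of Formatter().parse: next (literal_text, field_name) tuple and the rest of
-- the template (the rest after a field is irrelevant: A breaks there); none = exhausted
-- (or ValueError, which Pre_ excludes)
def pvFmtNext (cs : List Char) : Option (String × Option String × List Char) :=
  match pvLit [] cs with
  | none => none
  | some (l, .atEnd) => if l.isEmpty then none else some (String.ofList l, none, [])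
  | some (l, .lit r) => some (String.ofList l, none, r)
  | some (l, .field r) =>
      match pvName [] false r with
      | none => none
      | some nm => some (String.ofList l, some (String.ofList nm), [])

theorem pvLit_lit_length : ∀ (acc cs l r : List Char),
    pvLit acc cs = some (l, .lit r) → r.length < cs.length := by
  intro acc cs
  fun_induction pvLit acc cs
  case case6 ih => intro l r h; have := ih l r h; simp; omega
  all_goals intro l r h <;> simp_all

theorem pvFmtNext_rest_lt (cs : List Char) (lit : String) (rest : List Char)
    (h : pvFmtNext cs = some (lit, none, rest)) : rest.length < cs.length := by
  unfold pvFmtNext at h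
  rcases hl : pvLit [] cs with _ | ⟨l, ch⟩ <;> rw [hl] at h
  · simp at h
  · cases ch with
    | atEnd =>
        by_cases he : l.isEmpty <;> simp [he] at h
        obtain ⟨-, h2⟩ := h
        subst h2
        cases cs with
        | nil => simp [pvLit] at hl; simp [hl] at he
        | cons c r => simp
    | lit r =>
        simp at h
        obtain ⟨-, h2⟩ := h
        subst h2
        exact pvLit_lit_length _ _ _ _ hl
    | field r =>
        rcases hn : pvName [] false r with _ | nm <;> simp [hn] at h

-- A's loop: for literal_text, field_name, _, _ in parsed: append; break if field
def pyALoop (cs : List Char) (text : List String) : List String :=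
  match h : pvFmtNext cs with
  | none => text
  | some (l, some _, _) => text ++ [l]
  | some (l, none, rest) => pyALoop rest (text ++ [l])
termination_by cs.length
decreasing_by exact pvFmtNext_rest_lt cs _ _ h

def text_before_first_field_py (template : String) : String :=
  String.join (pyALoop template.toList [])

-- ===== PORT B =====
-- Source B: one index scan collecting literal chars; doubled braces unescaped; stops at the
-- first field.  Where Source B raises ValueError (lone '}' , trailing '{' — both outside
-- Pre_) the port returns the characters collected so far instead of an exception.
def bScan : List Char → List Char → List Char
  | acc, [] => acc.reverse
  | acc, '{' :: '{' :: r => bScan ('{' :: acc) r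
  | acc, '}' :: '}' :: r => bScan ('}' :: acc) r
  | acc, '{' :: _ => acc.reverse   -- a replacement field begins (raise if at end: ¬ Pre_)
  | acc, '}' :: _ => acc.reverse   -- Source B raises ValueError here: ¬ Pre_
  | acc, c :: r => bScan (c :: acc) r

def text_before_first_field_py_alt (template : String) : String :=
  String.ofList (bScan [] template.toList)

-- ===== PRECONDITION & SPEC =====
-- Pre_ holds exactly when Formatter().parse yields its tuples up to and including the
-- first replacement field without raising ValueError: the brace syntax of the template
-- is valid — no lone '}' and no lone '{' in the literal text before the first field,
-- and, if a field starts, it is well formed (name without stray '{', '[...]' closed,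
-- at most one conversion character after '!', format spec with balanced braces, and a
-- closing '}' before the end of the string).  Because format specs nest braces to
-- arbitrary depth, this set of templates is a bracket language: it can only be stated
-- as acceptance by the grammar below (independent of both ports), not by a finite
-- combination of bounds/membership tests.
def okSpec : List Char → Nat → Bool
  | [], _ => false
  | '{' :: r, d => okSpec r (d + 1)
  | '}' :: r, d => if d = 0 then true else okSpec r (d - 1)
  | _ :: r, d => okSpec r d

def okName : Bool → List Char → Bool
  | _, [] => false
  | true, c :: r => if c = ']' then okName false r else okName true r
  | false, '{' :: _ => false
  | false, '}' :: _ => true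
  | false, '[' :: r => okName true r
  | false, '!' :: r =>
      match r with
      | _ :: '}' :: _ => true
      | _ :: ':' :: r3 => okSpec r3 0
      | _ => false
  | false, ':' :: r => okSpec r 0
  | false, _ :: r => okName false r

def okTemplate : List Char → Bool
  | [] => true
  | '{' :: '{' :: r => okTemplate r
  | '}' :: '}' :: r => okTemplate r
  | '{' :: r => okName false r
  | '}' :: _ => false
  | _ :: r => okTemplate r

def Pre_text_before_first_field_py (template : String) : Prop :=
  okTemplate template.toList = true
instance (template : String) : Decidable (Pre_text_before_first_field_py template) := by
  unfold Pre_text_before_first_field_py; infer_instance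

def pvWitness_text_before_first_field_py : String := "a{{b}}c{x:>3}d"

def Spec_text_before_first_field_py (template : String) (out : String) : Prop := out = text_before_first_field_py_alt template
instance (template : String) (out : String) : Decidable (Spec_text_before_first_field_py template out) := by unfold Spec_text_before_first_field_py; infer_instance

-- ===== CLAIM (what is proved, stated in full; the proofs are below) =====
def Claim_equal_text_before_first_field_py : Prop := ∀ (template : String), Dom_text_before_first_field_py template → Pre_text_before_first_field_py template → Spec_text_before_first_field_py template (text_before_first_field_py template)

-- ===== LEMMAS AND PROOFS =====

-- the common value: literal characters before the first field, doubled braces unescaped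
def litPrefix : List Char → List Char
  | [] => []
  | '{' :: '{' :: r => '{' :: litPrefix r
  | '}' :: '}' :: r => '}' :: litPrefix r
  | '{' :: _ => []
  | '}' :: _ => []
  | c :: r => c :: litPrefix r

theorem bScan_eq_litPrefix : ∀ (acc cs : List Char),
    bScan acc cs = acc.reverse ++ litPrefix cs := by
  intro acc cs
  fun_induction bScan acc cs <;> simp_all [litPrefix]

theorem okSpec_pvSpec : ∀ (r : List Char) (d : Nat),
    okSpec r d = true → (pvSpec r d).isSome := by
  intro r d
  fun_induction okSpec r d <;> intro h <;> simp_all [pvSpec]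

theorem okName_pvName : ∀ (b : Bool) (r : List Char) (acc : List Char),
    okName b r = true → (pvName acc b r).isSome := by
  intro b r
  suffices h : ∀ acc, okName b r = true → (pvName acc b r).isSome by
    intro acc; exact h acc
  fun_induction okName b r <;> intro acc h <;> simp_all [pvName]
  all_goals (obtain ⟨w, hw⟩ := Option.isSome_iff_exists.mp (okSpec_pvSpec _ _ h); rw [hw]; rfl)

-- chunk-level characterisation of pvLit against litPrefix / okTemplate
theorem pvLit_char : ∀ (acc cs : List Char),
    (pvLit acc cs = none → okTemplate cs = false)
    ∧ (∀ l, pvLit acc cs = some (l, .atEnd) →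
        l = acc.reverse ++ litPrefix cs ∧ okTemplate cs = true)
    ∧ (∀ l r, pvLit acc cs = some (l, .lit r) →
        acc.reverse ++ litPrefix cs = l ++ litPrefix r ∧ okTemplate cs = okTemplate r)
    ∧ (∀ l r, pvLit acc cs = some (l, .field r) →
        l = acc.reverse ++ litPrefix cs ∧ okTemplate cs = okName false r) := by
  intro acc cs
  fun_induction pvLit acc cs <;> simp_all [litPrefix, okTemplate]
  rename_i ih
  exact ⟨ih.2.2.1, fun l r h => (ih.2.2.2 l r h).2⟩

theorem join_snoc (text : List String) (s : String) :
    String.join (text ++ [s]) = String.join text ++ s := by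
  simp [String.join, List.foldl_append]

theorem pvFmtNext_empty : pvFmtNext [] = none := rfl

theorem pyALoop_join : ∀ (cs : List Char), okTemplate cs = true → ∀ (text : List String),
    String.join (pyALoop cs text) = String.join text ++ String.ofList (litPrefix cs) := by
  intro cs
  induction hn : cs.length using Nat.strong_induction_on generalizing cs with
  | _ n ih =>
  intro hok text
  rw [pyALoop.eq_def]
  split
  · -- parse exhausted without a field: the literal prefix is exactly what was emitted
    rename_i hf
    unfold pvFmtNext at hf
    rcases hl : pvLit [] cs with _ | ⟨l, ch⟩ <;> rw [hl] at hf
    · exact absurd ((pvLit_char [] cs).1 hl) (by simp [hok])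
    · cases ch with
      | atEnd =>
          by_cases he : l.isEmpty <;> simp [he] at hf
          have := ((pvLit_char [] cs).2.1 l hl).1
          simp at this
          rw [← this]
          simp_all
      | lit r => simp at hf
      | field r =>
          have hchar := (pvLit_char [] cs).2.2.2 l r hl
          have hname : okName false r = true := by rw [← hchar.2]; exact hok
          obtain ⟨w, hw⟩ := Option.isSome_iff_exists.mp (okName_pvName false r [] hname)
          simp [hw] at hf
  · -- first field reached: append its preceding literal text and stop
    rename_i l fn rest hf
    unfold pvFmtNext at hf
    rcases hl : pvLit [] cs with _ | ⟨l', ch⟩ <;> rw [hl] at hf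
    · simp at hf
    · cases ch with
      | atEnd => by_cases he : l'.isEmpty <;> simp [he] at hf
      | lit r => simp at hf
      | field r =>
          have hchar := (pvLit_char [] cs).2.2.2 l' r hl
          rcases hn2 : pvName [] false r with _ | nm <;> simp [hn2] at hf
          rw [join_snoc, ← hf.1, hchar.1]
          simp
  · -- a doubled brace (or end) closed this literal chunk: continue on the rest
    rename_i l rest hf
    have hlt := pvFmtNext_rest_lt cs l rest hf
    unfold pvFmtNext at hf
    rcases hl : pvLit [] cs with _ | ⟨l', ch⟩ <;> rw [hl] at hf
    · simp at hf
    · cases ch with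
      | atEnd =>
          by_cases he : l'.isEmpty <;> simp [he] at hf
          have hchar := (pvLit_char [] cs).2.1 l' hl
          obtain ⟨hf1, hf2⟩ := hf
          subst hf2
          rw [pyALoop.eq_def, pvFmtNext_empty]
          simp only [join_snoc]
          rw [← hf1]
          have h3 := hchar.1
          simp at h3
          rw [← h3]
      | lit r =>
          simp at hf
          have hchar := (pvLit_char [] cs).2.2.1 l' r hl
          have hokr : okTemplate r = true := by rw [← hchar.2]; exact hok
          obtain ⟨he1, he2⟩ := hf
          subst he2
          rw [ih _ (hn ▸ hlt) _ rfl hokr (text ++ [l])]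
          rw [join_snoc]
          have h3 := hchar.1
          simp at h3
          rw [String.append_assoc, ← he1, ← String.ofList_append, ← h3]
      | field r =>
          rcases hn2 : pvName [] false r with _ | nm <;> simp [hn2] at hf

-- ===== VERDICT (by name: the statement is the Claim_ definition above) =====
theorem text_before_first_field_py_spec : Claim_equal_text_before_first_field_py := by
  intro t _ hpre
  unfold Spec_text_before_first_field_py text_before_first_field_py text_before_first_field_py_alt
  rw [pyALoop_join t.toList hpre [], bScan_eq_litPrefix]
  simp [String.join]
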